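-- pv_equiv track=rewrite | github.com/h3z/rl-test | yml_creator.py | _get_ld_info
-- ===== SOURCE A (Python) =====
-- def _get_ld_info(ld_name, adjld_name, stoenergy_name):
--     ld_type = [0] * len(ld_name)
--     adjld_ids = [i for i, x in enumerate(ld_name) if x in adjld_name]
--     stoenergy_ids = [i for i, x in enumerate(ld_name) if x in stoenergy_name]
--
--     for i in adjld_ids:
--         ld_type[i] = 1
--     for j in stoenergy_ids:
--         ld_type[j] = 2
--     return adjld_ids, stoenergy_ids, ld_type
-- ===== SOURCE B (Python) =====
-- def _get_ld_info(ld_name, adjld_name, stoenergy_name):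
--     adj = set(adjld_name)
--     sto = set(stoenergy_name)
--     adjld_ids = []
--     stoenergy_ids = []
--     ld_type = []
--     for i, x in enumerate(ld_name):
--         in_a = x in adj
--         in_s = x in sto
--         if in_a:
--             adjld_ids.append(i)
--         if in_s:
--             stoenergy_ids.append(i)
--         ld_type.append(2 if in_s else (1 if in_a else 0))
--     return adjld_ids, stoenergy_ids, ld_type
-- ===== Notes on version B (the rewrite author's own statement) =====
-- stated objective: faster
-- what changed: Replaces the two enumerate-filter comprehensions plus two index-fill loops over a preallocated [0]*n list with a single pass that builds all three results incrementally (ld_type computed per element, no post-fill mutation) and tests membership against sets instead of scanning the name lists.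
import Mathlib
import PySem

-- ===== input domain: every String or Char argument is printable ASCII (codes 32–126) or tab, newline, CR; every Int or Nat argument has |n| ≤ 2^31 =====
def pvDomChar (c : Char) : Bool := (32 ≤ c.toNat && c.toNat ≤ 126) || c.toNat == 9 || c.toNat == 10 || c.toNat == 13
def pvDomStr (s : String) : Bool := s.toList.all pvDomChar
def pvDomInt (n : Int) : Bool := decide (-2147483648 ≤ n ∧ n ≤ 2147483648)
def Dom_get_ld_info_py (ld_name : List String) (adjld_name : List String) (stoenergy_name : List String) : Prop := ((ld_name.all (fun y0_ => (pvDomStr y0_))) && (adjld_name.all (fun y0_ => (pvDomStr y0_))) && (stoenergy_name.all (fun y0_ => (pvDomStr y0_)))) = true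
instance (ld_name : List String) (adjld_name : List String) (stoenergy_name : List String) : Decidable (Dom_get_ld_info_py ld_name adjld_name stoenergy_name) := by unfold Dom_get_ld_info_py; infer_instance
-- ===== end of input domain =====

-- B fuses A's two comprehensions and two fill loops into one pass with set-based membership; equivalence of the return value is proved (neither version mutates its arguments).

-- ===== PORT A =====
def get_ld_info_py (ld_name : List String) (adjld_name : List String) (stoenergy_name : List String) : List (List Int) :=
  let ld_type : List Int := List.replicate ld_name.length 0
  let adjld_ids : List Int :=
    ((PySem.List.enumerate ld_name 0).filter (fun p => adjld_name.contains p.2)).map (·.1)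
  let stoenergy_ids : List Int :=
    ((PySem.List.enumerate ld_name 0).filter (fun p => stoenergy_name.contains p.2)).map (·.1)
  let ld_type := adjld_ids.foldl (fun lt i => PySem.List.pySetD lt i 1) ld_type
  let ld_type := stoenergy_ids.foldl (fun lt j => PySem.List.pySetD lt j 2) ld_type
  [adjld_ids, stoenergy_ids, ld_type]

-- ===== PORT B =====
def get_ld_info_py_alt (ld_name : List String) (adjld_name : List String) (stoenergy_name : List String) : List (List Int) :=
  let adj := PySem.Set.ofList adjld_name
  let sto := PySem.Set.ofList stoenergy_name
  let r := (PySem.List.enumerate ld_name 0).foldl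
    (fun (acc : List Int × List Int × List Int) p =>
      let in_a := PySem.Set.contains adj p.2
      let in_s := PySem.Set.contains sto p.2
      (if in_a then acc.1 ++ [p.1] else acc.1,
       if in_s then acc.2.1 ++ [p.1] else acc.2.1,
       acc.2.2 ++ [if in_s then 2 else if in_a then 1 else 0]))
    ([], [], [])
  [r.1, r.2.1, r.2.2]

-- ===== PRECONDITION & SPEC =====
def Spec_get_ld_info_py (ld_name : List String) (adjld_name : List String) (stoenergy_name : List String) (out : List (List Int)) : Prop := out = get_ld_info_py_alt ld_name adjld_name stoenergy_name
instance (ld_name : List String) (adjld_name : List String) (stoenergy_name : List String) (out : List (List Int)) : Decidable (Spec_get_ld_info_py ld_name adjld_name stoenergy_name out) := by unfold Spec_get_ld_info_py; infer_instance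

-- ===== CLAIM (what is proved, stated in full; the proofs are below) =====
def Claim_equal_get_ld_info_py : Prop := ∀ (ld_name : List String) (adjld_name : List String) (stoenergy_name : List String), Dom_get_ld_info_py ld_name adjld_name stoenergy_name → Spec_get_ld_info_py ld_name adjld_name stoenergy_name (get_ld_info_py ld_name adjld_name stoenergy_name)

-- ===== LEMMAS AND PROOFS =====

theorem pySetD_length (xs : List Int) (i v : Int) :
    (PySem.List.pySetD xs i v).length = xs.length := by
  unfold PySem.List.pySetD PySem.List.pySet? PySem.List.pyIdx?
  split <;> split <;> simp_all

theorem pySetD_of_nonneg_lt (xs : List Int) (i v : Int) (h0 : 0 ≤ i) (h1 : i.toNat < xs.length) :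
    PySem.List.pySetD xs i v = xs.set i.toNat v := by
  unfold PySem.List.pySetD PySem.List.pySet? PySem.List.pyIdx?
  split <;> rename_i h <;> simp_all

theorem fill_length (xs : List Int) (lt : List Int) (v : Int) :
    (xs.foldl (fun l i => PySem.List.pySetD l i v) lt).length = lt.length := by
  induction xs generalizing lt with
  | nil => rfl
  | cons i xs ih => simp [List.foldl, ih]

-- getElem? of the fill loop, when every index in xs is a nonnegative in-range Int
theorem fill_getElem? (xs : List Int) (lt : List Int) (v : Int)
    (h : ∀ i ∈ xs, 0 ≤ i ∧ i.toNat < lt.length) (j : Nat) :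
    (xs.foldl (fun l i => PySem.List.pySetD l i v) lt)[j]? =
      if (j : Int) ∈ xs then some v else lt[j]? := by
  induction xs generalizing lt with
  | nil => simp
  | cons i xs ih =>
    have hi := h i (by simp)
    have hlen : (PySem.List.pySetD lt i v).length = lt.length := pySetD_length lt i v
    rw [List.foldl_cons, ih _ (fun k hk => by rw [hlen]; exact h k (by simp [hk]))]
    rw [pySetD_of_nonneg_lt lt i v hi.1 hi.2]
    by_cases hmem : (j : Int) ∈ xs
    · simp [hmem]
    · by_cases hij : (j : Int) = i
      · have : j = i.toNat := by omega
        subst this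
        simp [hi.2, hij]
      · have : i.toNat ≠ j := by omega
        simp [hmem, hij, List.getElem?_set_ne this]

-- membership of an index in A's id lists
theorem mem_ids_iff (ld : List String) (p : Int × String → Bool) (j : Nat) (hj : j < ld.length) :
    ((j : Int) ∈ ((PySem.List.enumerate ld 0).filter p).map (·.1)) ↔ p ((j : Int), ld[j]) := by
  constructor
  · rintro h
    rcases List.mem_map.mp h with ⟨q, hq, hq1⟩
    rcases List.mem_filter.mp hq with ⟨hqe, hqp⟩
    rcases (PySem.List.mem_enumerate_iff _ _ _).mp hqe with ⟨k, hk, rfl⟩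
    simp at hq1
    have : k = j := by omega
    subst this
    simpa using hqp
  · intro hp
    refine List.mem_map.mpr ⟨((j : Int), ld[j]), List.mem_filter.mpr ⟨?_, hp⟩, rfl⟩
    exact (PySem.List.mem_enumerate_iff _ _ _).mpr ⟨j, hj, by simp⟩

theorem contains_ofList (s : List String) (x : String) :
    PySem.Set.contains (PySem.Set.ofList s) x = s.contains x := by
  simp [PySem.Set.contains]

-- A's filled ld_type equals the per-element map B builds
theorem ldtype_eq (ld adj sto : List String) :
    (let lt0 : List Int := List.replicate ld.length 0
     let a_ids : List Int := ((PySem.List.enumerate ld 0).filter (fun p => adj.contains p.2)).map (·.1)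
     let s_ids : List Int := ((PySem.List.enumerate ld 0).filter (fun p => sto.contains p.2)).map (·.1)
     s_ids.foldl (fun l j => PySem.List.pySetD l j 2)
       (a_ids.foldl (fun l i => PySem.List.pySetD l i 1) lt0)) =
    (PySem.List.enumerate ld 0).map
      (fun p => if sto.contains p.2 then (2 : Int) else if adj.contains p.2 then 1 else 0) := by
  simp only []
  have hbound : ∀ (q : Int × String → Bool) (i : Int),
      i ∈ ((PySem.List.enumerate ld 0).filter q).map (·.1) → 0 ≤ i ∧ i.toNat < ld.length := by
    intro q i hi
    rcases List.mem_map.mp hi with ⟨p, hp, rfl⟩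
    rcases (PySem.List.mem_enumerate_iff _ _ _).mp (List.mem_filter.mp hp).1 with ⟨k, hk, rfl⟩
    simp; omega
  apply List.ext_getElem?
  intro j
  have hlen1 : ∀ (xs : List Int) (v : Int) (lt : List Int),
      (xs.foldl (fun l i => PySem.List.pySetD l i v) lt).length = lt.length := fun xs v lt => fill_length xs lt v
  by_cases hj : j < ld.length
  · rw [fill_getElem? _ _ _ (fun i hi => by
        rw [hlen1, List.length_replicate]; exact hbound _ i hi) j]
    rw [fill_getElem? _ _ _ (fun i hi => by
        rw [List.length_replicate]; exact hbound _ i hi) j]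
    simp only [mem_ids_iff ld _ j hj]
    rw [List.getElem?_map, PySem.List.getElem?_enumerate]
    simp only [List.getElem?_eq_getElem hj, Option.map_some, List.getElem?_replicate]
    split_ifs <;> simp_all
  · have h1 : ((PySem.List.enumerate ld 0).map
        (fun p => if sto.contains p.2 then (2 : Int) else if adj.contains p.2 then 1 else 0))[j]? = none := by
      rw [List.getElem?_eq_none]
      simp [PySem.List.length_enumerate]; omega
    rw [h1, List.getElem?_eq_none]
    rw [hlen1, hlen1, List.length_replicate]; omega

-- B's triple fold splits into three independent folds
theorem alt_split (ld adj sto : List String) :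
    get_ld_info_py_alt ld adj sto =
      [((PySem.List.enumerate ld 0).filter (fun p => PySem.Set.contains (PySem.Set.ofList adj) p.2)).map (·.1),
       ((PySem.List.enumerate ld 0).filter (fun p => PySem.Set.contains (PySem.Set.ofList sto) p.2)).map (·.1),
       (PySem.List.enumerate ld 0).map
         (fun p => if PySem.Set.contains (PySem.Set.ofList sto) p.2 then (2 : Int)
                   else if PySem.Set.contains (PySem.Set.ofList adj) p.2 then 1 else 0)] := by
  unfold get_ld_info_py_alt
  simp only []
  rw [PySem.List.foldl_prod_mk
        (f := fun (a : List Int) (p : Int × String) =>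
          if PySem.Set.contains (PySem.Set.ofList adj) p.2 then a ++ [p.1] else a)
        (g := fun (b : List Int × List Int) (p : Int × String) =>
          (if PySem.Set.contains (PySem.Set.ofList sto) p.2 then b.1 ++ [p.1] else b.1,
           b.2 ++ [if PySem.Set.contains (PySem.Set.ofList sto) p.2 then (2:Int)
                   else if PySem.Set.contains (PySem.Set.ofList adj) p.2 then 1 else 0]))]
  rw [PySem.List.foldl_prod_mk
        (f := fun (b : List Int) (p : Int × String) =>
          if PySem.Set.contains (PySem.Set.ofList sto) p.2 then b ++ [p.1] else b)
        (g := fun (c : List Int) (p : Int × String) =>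
          c ++ [if PySem.Set.contains (PySem.Set.ofList sto) p.2 then (2:Int)
                else if PySem.Set.contains (PySem.Set.ofList adj) p.2 then 1 else 0])]
  rw [PySem.List.foldl_append_if
        (p := fun p : Int × String => PySem.Set.contains (PySem.Set.ofList adj) p.2) (f := (·.1)),
      PySem.List.foldl_append_if
        (p := fun p : Int × String => PySem.Set.contains (PySem.Set.ofList sto) p.2) (f := (·.1)),
      PySem.List.foldl_append_singleton_eq_map]
  simp

-- ===== VERDICT (by name: the statement is the Claim_ definition above) =====
theorem get_ld_info_py_spec : Claim_equal_get_ld_info_py := by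
  intro ld adj sto _
  unfold Spec_get_ld_info_py
  rw [alt_split]
  unfold get_ld_info_py
  simp only [contains_ofList]
  rw [ldtype_eq]
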